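-- pv_equiv track=rewrite | github.com/gwYun/2023-April-coding-study | gyeongwon-yun/additional/hiking_이분탐색.py | get_min_summit
-- ===== SOURCE A (Python) =====
-- from collections import deque
--
-- def get_connections(n, paths, intensity):
--     connections = {}
--     for i in range(n):
--         connections[i+1] = []
--
--     for i, p in enumerate(paths):
--         i, j, w = p
--
--         if w > intensity:
--             break
--
--         connections[i].append(j)
--         connections[j].append(i)
--
--     return connections
--
-- def get_links(n, start, end, connections):
--     queue = deque(start)
--     visited = [False for _ in range(n+1)]
--     while queue:
--         current = queue.popleft()
--
--         if visited[current]: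
--             continue
--
--         else:
--             visited[current] = True
--             if not end[current]:
--                 queue+=connections[current]
--
--     return visited
--
-- def get_min_summit(n, paths, intensity, gates, summits):
--     connections = get_connections(n, paths, intensity)
--     end = [True if i in summits else False for i in range(n+1)]
--     links_from_gates = get_links(n, gates, end, connections)
--
--     for s in sorted(summits):
--         if links_from_gates[s]:
--             return s
--
--     return False
-- ===== SOURCE B (Python) =====
-- def get_min_summit(n, paths, intensity, gates, summits):
--     end = [i in summits for i in range(n + 1)]
--     edges = []
--     for p in paths:
--         a, b, w = p
--         if w > intensity:
--             break
--         edges.append((a, b))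
--         edges.append((b, a))
--     visited = [False] * (n + 1)
--     for g in gates:
--         visited[g] = True
--     changed = True
--     while changed:
--         changed = False
--         for a, b in edges:
--             if visited[a] and not end[a] and not visited[b]:
--                 visited[b] = True
--                 changed = True
--     candidates = [s for s in summits if visited[s]]
--     return min(candidates) if candidates else False
-- ===== Notes on version B (the rewrite author's own statement) =====
-- stated objective: alternative
-- what changed: A builds an adjacency dict and runs a FIFO-queue BFS from the gates, then scans the sorted summits for the first visited one; B drops the dict, the queue and the sort entirely: it marks the gates and repeatedly relaxes a flat edge list (Bellman-Ford-style saturation passes) until no visited flag changes, then returns min() of the visited summits.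
-- outside the precondition, e.g. on get_min_summit(0, [], 0, [], []): A returns False, B returns False; on get_min_summit(1, [], 0, [1], [1, 5]): A returns 1, B raises IndexError; on get_min_summit(2, [], 0, [1, -2], [-2]): A returns -2, B returns -2
import Mathlib
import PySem

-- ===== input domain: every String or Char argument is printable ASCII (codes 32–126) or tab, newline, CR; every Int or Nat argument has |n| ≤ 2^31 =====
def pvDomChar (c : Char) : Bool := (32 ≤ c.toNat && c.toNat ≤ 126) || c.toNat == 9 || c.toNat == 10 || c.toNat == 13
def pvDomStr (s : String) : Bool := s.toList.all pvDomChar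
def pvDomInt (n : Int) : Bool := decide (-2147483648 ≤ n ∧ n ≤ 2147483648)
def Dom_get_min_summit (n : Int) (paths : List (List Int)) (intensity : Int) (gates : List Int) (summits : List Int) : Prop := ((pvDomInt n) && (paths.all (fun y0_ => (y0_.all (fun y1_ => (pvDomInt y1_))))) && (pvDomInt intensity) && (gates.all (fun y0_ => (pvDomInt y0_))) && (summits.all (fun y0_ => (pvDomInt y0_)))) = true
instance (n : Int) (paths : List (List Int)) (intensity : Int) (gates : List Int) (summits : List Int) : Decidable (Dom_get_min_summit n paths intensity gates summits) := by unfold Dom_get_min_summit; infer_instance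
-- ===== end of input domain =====

-- B replaces A's adjacency-dict + FIFO-queue BFS by a dict-free edge-list saturation
-- (repeated relaxation passes until no flag changes); same return value on Pre_.

-- ===== PORT A =====

-- helper used only by the termination measure of the BFS loop below
def pvCountFalse (v : List Bool) : Nat := v.count false

theorem pvCountFalse_getElem_set_lt (xs : List Bool) (k : Nat) (h : xs[k]? = some false) :
    pvCountFalse (xs.set k true) < pvCountFalse xs := by
  induction xs generalizing k with
  | nil => simp at h
  | cons x t ih =>
    cases k with
    | zero =>
      simp_all [pvCountFalse]
    | succ m =>
      simp only [List.getElem?_cons_succ] at h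
      simp only [List.set_cons_succ, pvCountFalse, List.count_cons]
      have := ih m h
      simp [pvCountFalse] at this
      omega

theorem pvCountFalse_set_lt (xs : List Bool) (i : Int) (h : PySem.List.pyGet? xs i = some false) :
    pvCountFalse (PySem.List.pySetD xs i true) < pvCountFalse xs := by
  unfold PySem.List.pyGet? at h
  unfold PySem.List.pySetD PySem.List.pySet?
  cases hk : PySem.List.pyIdx? xs.length i with
  | none => rw [hk] at h; simp at h
  | some k =>
    rw [hk] at h
    simp only [Option.bind_some] at h
    simp only [Option.map_some, Option.getD_some]

    exact pvCountFalse_getElem_set_lt xs k h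

-- get_connections: the edge loop ('for i, p in enumerate(paths): i, j, w = p; if w > intensity: break; …')
-- 'i, j, w = p' unpacked with pyGetD (exact when p has length 3, which Pre_ guarantees);
-- 'connections[i].append(j)' ported as Dict.modify (Python raises KeyError on a missing key — outside Pre_).
def pvA_edgeLoop (intensity : Int) (d : PySem.Dict Int (List Int)) : List (List Int) → PySem.Dict Int (List Int)
  | [] => d
  | p :: rest =>
    let i := PySem.List.pyGetD p 0 0
    let j := PySem.List.pyGetD p 1 0
    let w := PySem.List.pyGetD p 2 0
    if intensity < w then d
    else pvA_edgeLoop intensity ((d.modify i [] (· ++ [j])).modify j [] (· ++ [i])) rest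

def pvA_connections (n : Int) (paths : List (List Int)) (intensity : Int) : PySem.Dict Int (List Int) :=
  pvA_edgeLoop intensity
    ((PySem.List.pyRange 0 n 1).foldl (fun d i => d.insert (i + 1) ([] : List Int)) PySem.Dict.empty)
    paths

-- get_links: 'while queue: current = queue.popleft(); …'
-- 'visited[current]' → pyGet? (none = IndexError, outside Pre_); 'end[current]' / 'connections[current]'
-- read with a default (Python raises there — outside Pre_).
def pvA_bfs (conns : PySem.Dict Int (List Int)) (endL : List Bool) : List Int → List Bool → List Bool
  | [], visited => visited
  | current :: rest, visited =>
    match h : PySem.List.pyGet? visited current with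
    | none => visited
    | some true => pvA_bfs conns endL rest visited
    | some false =>
      let visited' := PySem.List.pySetD visited current true
      if PySem.List.pyGetD endL current false then pvA_bfs conns endL rest visited'
      else pvA_bfs conns endL (rest ++ conns.getD current []) visited'
termination_by q v => (pvCountFalse v, q.length)
decreasing_by
  · apply Prod.Lex.right; simp
  · apply Prod.Lex.left; exact pvCountFalse_set_lt visited current h
  · apply Prod.Lex.left; exact pvCountFalse_set_lt visited current h

-- 'for s in sorted(summits): if links_from_gates[s]: return s' then 'return False' (False == 0)
def pvA_scan (links : List Bool) : List Int → Int
  | [] => 0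
  | s :: rest =>
    match PySem.List.pyGet? links s with
    | some true => s
    | some false => pvA_scan links rest
    | none => pvA_scan links rest   -- Python: IndexError (outside Pre_)

def get_min_summit (n : Int) (paths : List (List Int)) (intensity : Int) (gates : List Int) (summits : List Int) : Int :=
  let connections := pvA_connections n paths intensity
  let endL := (PySem.List.pyRange 0 (n + 1) 1).map (fun i => summits.contains i)
  let links := pvA_bfs connections endL gates ((PySem.List.pyRange 0 (n + 1) 1).map (fun _ => false))
  pvA_scan links (PySem.List.sorted summits (fun x => x) false)

-- ===== PORT B =====

-- the directed edge list (both directions per scanned row), with A's break rule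
def pvB_edges (intensity : Int) : List (List Int) → List (Int × Int)
  | [] => []
  | p :: rest =>
    let a := PySem.List.pyGetD p 0 0
    let b := PySem.List.pyGetD p 1 0
    let w := PySem.List.pyGetD p 2 0
    if intensity < w then []
    else (a, b) :: (b, a) :: pvB_edges intensity rest

-- one relaxation pass over the edge list; reads with a default (Python raises out of range — outside Pre_)
def pvB_pass (endL : List Bool) (edges : List (Int × Int)) (v : List Bool) : List Bool × Bool :=
  edges.foldl
    (fun st e =>
      if PySem.List.pyGetD st.1 e.1 false && !PySem.List.pyGetD endL e.1 false
          && !PySem.List.pyGetD st.1 e.2 false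
      then (PySem.List.pySetD st.1 e.2 true, true) else st)
    (v, false)

-- 'while changed:' — each pass that reports a change flips at least one False cell,
-- so length+1 passes of fuel always reach the unchanged pass
def pvB_loop (endL : List Bool) (edges : List (Int × Int)) : Nat → List Bool → List Bool
  | 0, v => v
  | fuel + 1, v =>
    let st := pvB_pass endL edges v
    if st.2 then pvB_loop endL edges fuel st.1 else st.1

-- 'candidates = [s for s in summits if visited[s]]; return min(candidates) if candidates else False'
-- 'visited[s]' read with a default (Python raises IndexError out of range — outside Pre_)
def pvB_result (links : List Bool) (summits : List Int) : Int :=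
  let candidates := summits.filter (fun s => PySem.List.pyGetD links s false)
  match PySem.List.min? candidates (fun x => x) with
  | some m => m
  | none => 0    -- Python: False (False == 0)

def get_min_summit_alt (n : Int) (paths : List (List Int)) (intensity : Int) (gates : List Int) (summits : List Int) : Int :=
  let endL := (PySem.List.pyRange 0 (n + 1) 1).map (fun i => summits.contains i)
  let edges := pvB_edges intensity paths
  let v0 := PySem.List.pyRepeat [false] (n + 1)                 -- [False] * (n + 1)
  let v1 := gates.foldl (fun v g => PySem.List.pySetD v g true) v0
  let links := pvB_loop endL edges (v1.length + 1) v1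
  pvB_result links summits

-- ===== PRECONDITION & SPEC =====

-- shape of the path rows A actually scans: each scanned row is a length-3 [a, b, w]
-- with 1 ≤ a, b ≤ n unless its weight breaks the loop
def pvRowsOK (n intensity : Int) : List (List Int) → Bool
  | [] => true
  | [a, b, w] :: rest =>
    if intensity < w then true
    else decide (1 ≤ a) && decide (a ≤ n) && decide (1 ≤ b) && decide (b ≤ n) && pvRowsOK n intensity rest
  | _ :: _ => false

-- the scanned (pre-break) rows as one edge pair each, used only by Pre_'s reachability conjunct
def pvPreEdges (intensity : Int) : List (List Int) → List (Int × Int)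
  | [] => []
  | p :: rest =>
    match p with
    | [a, b, w] => if intensity < w then [] else (a, b) :: pvPreEdges intensity rest
    | _ => []

-- Python's wrapped list index for a (possibly negative) node id
def pvWrap (n g : Int) : Int := if 0 ≤ g then g else n + 1 + g

-- one closure step: nodes adjacent (in either direction) to a non-summit member
def pvPreStep (edges : List (Int × Int)) (summits : List Int) (cur : List Int) : List Int :=
  PySem.Set.update cur
    (((edges.filter (fun e => decide (e.1 ∈ cur) && !decide (e.1 ∈ summits))).map (·.2)) ++
     ((edges.filter (fun e => decide (e.2 ∈ cur) && !decide (e.2 ∈ summits))).map (·.1)))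

-- nodes connected to a gate through scanned edges, never expanding a summit
def pvPreReach (n intensity : Int) (paths : List (List Int)) (gates summits : List Int) : List Int :=
  let edges := pvPreEdges intensity paths
  (pvPreStep edges summits)^[gates.length + 2 * edges.length + 1]
    (PySem.Set.ofList (gates.map (pvWrap n)))

-- Pre_ excludes (i) inputs where A raises: a scanned malformed or out-of-range path row
-- (ValueError/KeyError), a gate outside Python's index range (IndexError) or an unvisited
-- non-summit gate outside 1..n (KeyError) — conservatively, every gate outside 1..n must be a
-- wrapped summit — and a summit outside Python's index range (IndexError) — conservatively all
-- of them, although A only indexes summits up to the first reachable one; and (ii) the corner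
-- where no summit is reachable, where A returns the bool False instead of an int (B does too);
-- reachability is decided by a plain closure over the scanned edge list, independent of both ports.
def Pre_get_min_summit (n : Int) (paths : List (List Int)) (intensity : Int) (gates : List Int) (summits : List Int) : Prop :=
  pvRowsOK n intensity paths = true ∧
  (∀ g ∈ gates, (1 ≤ g ∧ g ≤ n) ∨ (-(n + 1) ≤ g ∧ g ≤ n ∧ (if 0 ≤ g then g else n + 1 + g) ∈ summits)) ∧
  (∀ s ∈ summits, -(n + 1) ≤ s ∧ s ≤ n) ∧
  (∃ s ∈ summits, pvWrap n s ∈ pvPreReach n intensity paths gates summits)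

instance (n : Int) (paths : List (List Int)) (intensity : Int) (gates : List Int) (summits : List Int) : Decidable (Pre_get_min_summit n paths intensity gates summits) := by
  unfold Pre_get_min_summit; infer_instance

def pvWitness_get_min_summit : Int × List (List Int) × Int × List Int × List Int :=
  (4, [[1, 2, 3], [2, 3, 5]], 10, [1], [3])

def Spec_get_min_summit (n : Int) (paths : List (List Int)) (intensity : Int) (gates : List Int) (summits : List Int) (out : Int) : Prop := out = get_min_summit_alt n paths intensity gates summits
instance (n : Int) (paths : List (List Int)) (intensity : Int) (gates : List Int) (summits : List Int) (out : Int) : Decidable (Spec_get_min_summit n paths intensity gates summits out) := by unfold Spec_get_min_summit; infer_instance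

-- ===== CLAIM (what is proved, stated in full; the proofs are below) =====
def Claim_equal_get_min_summit : Prop := ∀ (n : Int) (paths : List (List Int)) (intensity : Int) (gates : List Int) (summits : List Int), Dom_get_min_summit n paths intensity gates summits → Pre_get_min_summit n paths intensity gates summits → Spec_get_min_summit n paths intensity gates summits (get_min_summit n paths intensity gates summits)

-- ===== LEMMAS AND PROOFS =====

-- ---- generic index / list helpers ----

theorem pvIdx_nonneg (L : Nat) (i : Int) (h0 : 0 ≤ i) (h1 : i < (L : Int)) :
    PySem.List.pyIdx? L i = some i.toNat := by
  unfold PySem.List.pyIdx?; rw [if_pos h0, if_pos h1]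

theorem pvIdx_lt (L : Nat) (i : Int) (k : Nat) (h : PySem.List.pyIdx? L i = some k) : k < L := by
  unfold PySem.List.pyIdx? at h
  split_ifs at h with h0 h1 h2 <;> simp_all <;> omega

theorem pvIdx_nonneg_eq (L : Nat) (i : Int) (k : Nat) (h0 : 0 ≤ i)
    (h : PySem.List.pyIdx? L i = some k) : k = i.toNat := by
  unfold PySem.List.pyIdx? at h
  rw [if_pos h0] at h
  split_ifs at h
  exact (Option.some_inj.mp h).symm

theorem pvGetD_nonneg_toNat {α : Type} (v : List α) (i : Int) (d : α) (h : 0 ≤ i) :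
    PySem.List.pyGetD v i d = v.getD i.toNat d := by
  unfold PySem.List.pyGetD PySem.List.pyGet? PySem.List.pyIdx?
  rw [if_pos h]
  split_ifs with hlt
  · simp [List.getD_eq_getElem?_getD]
  · rw [List.getD_eq_getElem?_getD, List.getElem?_eq_none (by omega)]; simp

theorem pvGetD_idx {α : Type} (v : List α) (i : Int) (k : Nat) (d : α)
    (h : PySem.List.pyIdx? v.length i = some k) :
    PySem.List.pyGetD v i d = v.getD k d := by
  unfold PySem.List.pyGetD PySem.List.pyGet?
  rw [h]
  simp [List.getD_eq_getElem?_getD]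

theorem pvMark_getD (v : List Bool) (g : Int) (k : Nat) :
    (PySem.List.pySetD v g true).getD k false =
      if PySem.List.pyIdx? v.length g = some k then true else v.getD k false := by
  unfold PySem.List.pySetD PySem.List.pySet?
  cases hm : PySem.List.pyIdx? v.length g with
  | none => simp
  | some m =>
    have hmlt := pvIdx_lt _ _ _ hm
    simp only [Option.map_some, Option.getD_some]
    rw [List.getD_eq_getElem?_getD, List.getElem?_set, List.getD_eq_getElem?_getD]
    by_cases hk : m = k
    · subst hk; simp [hmlt]
    · simp [hk]

theorem pvCountFalse_le_length (xs : List Bool) : pvCountFalse xs ≤ xs.length :=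
  List.count_le_length

-- pyRange 0 m 1 is just the integers 0..m-1
theorem pvRange_eq (m : Int) :
    PySem.List.pyRange 0 m 1 = (List.range m.toNat).map (fun k : Nat => (k : Int)) := by
  by_cases h : 0 ≤ m
  · obtain ⟨k, rfl⟩ : ∃ k : Nat, m = (k : Int) := ⟨m.toNat, by omega⟩
    rw [Int.toNat_natCast]
    exact PySem.List.pyRange_zero_natCast k
  · have h0 : m.toNat = 0 := by omega
    rw [h0]
    unfold PySem.List.pyRange
    simp
    intro h2; omega

theorem pvRange_map_getD {α : Type} (m : Int) (f : Int → α) (k : Nat) (d : α) :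
    ((PySem.List.pyRange 0 m 1).map f).getD k d =
      if k < m.toNat then f (k : Int) else d := by
  rw [pvRange_eq, List.map_map]
  by_cases hk : k < m.toNat
  · rw [PySem.List.getD_map_range (f ∘ fun k => (k : Int)) _ _ _ hk]
    simp [hk]
  · rw [if_neg hk, List.getD_eq_getElem?_getD, List.getElem?_eq_none (by simp; omega)]; simp

theorem pvRange_map_length {α : Type} (m : Int) (f : Int → α) :
    ((PySem.List.pyRange 0 m 1).map f).length = m.toNat := by
  rw [pvRange_eq]; simp

theorem pvInit_eq (m : Int) :
    ((PySem.List.pyRange 0 m 1).map (fun _ => false)) = List.replicate m.toNat false := by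
  rw [pvRange_eq, List.map_map]
  simp [List.map_const']

-- ---- A's connections dict vs B's edge list ----

theorem pvBase_getD (l : List Int) (d : PySem.Dict Int (List Int))
    (h : ∀ c, d.getD c ([] : List Int) = []) (c : Int) :
    (l.foldl (fun d i => d.insert (i + 1) ([] : List Int)) d).getD c [] = [] := by
  induction l generalizing d with
  | nil => exact h c
  | cons x t ih =>
    simp only [List.foldl_cons]
    refine ih _ (fun c => ?_)
    rw [PySem.Dict.getD_insert]
    split <;> simp [h]

theorem pvEdgeLoop_eq (intensity : Int) (paths : List (List Int)) :
    ∀ d, pvA_edgeLoop intensity d paths =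
      (pvB_edges intensity paths).foldl (fun d e => d.modify e.1 ([] : List Int) (· ++ [e.2])) d := by
  induction paths with
  | nil => intro d; rfl
  | cons p rest ih =>
    intro d
    unfold pvA_edgeLoop pvB_edges
    by_cases hw : intensity < PySem.List.pyGetD p 2 0
    · simp [hw]
    · simp only [hw, if_false, List.foldl_cons]
      exact ih _

theorem pvConn_getD (n : Int) (paths : List (List Int)) (intensity : Int) (c : Int) :
    (pvA_connections n paths intensity).getD c [] =
      ((pvB_edges intensity paths).filter (fun e => e.1 == c)).map (·.2) := by
  unfold pvA_connections
  rw [pvEdgeLoop_eq, PySem.Dict.getD_foldl_modify_append,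
    pvBase_getD _ _ (fun c => PySem.Dict.getD_empty c [])]
  simp

theorem pvConn_mem (n : Int) (paths : List (List Int)) (intensity : Int) (c j : Int) :
    j ∈ (pvA_connections n paths intensity).getD c [] ↔ (c, j) ∈ pvB_edges intensity paths := by
  rw [pvConn_getD]
  simp only [List.mem_map, List.mem_filter]
  constructor
  · rintro ⟨e, ⟨he, heq⟩, rfl⟩
    have h1 : e.1 = c := by simpa using heq
    have h2 : e = (c, e.2) := by cases e; simp_all
    rwa [h2] at he
  · intro h
    exact ⟨(c, j), ⟨h, by simp⟩, rfl⟩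

-- ---- bounds of the scanned edges from Pre_'s row condition ----

theorem pvEdges_bound (n intensity : Int) (paths : List (List Int))
    (hrows : pvRowsOK n intensity paths = true) :
    ∀ e ∈ pvB_edges intensity paths, 1 ≤ e.1 ∧ e.1 ≤ n ∧ 1 ≤ e.2 ∧ e.2 ≤ n := by
  induction paths with
  | nil => intro e he; simp [pvB_edges] at he
  | cons p rest ih =>
    intro e he
    match p, hrows with
    | [a, b, w], hrows =>
      unfold pvRowsOK at hrows
      unfold pvB_edges at he
      have ha : PySem.List.pyGetD [a, b, w] 0 0 = a := rfl
      have hb : PySem.List.pyGetD [a, b, w] 1 0 = b := rfl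
      have hw : PySem.List.pyGetD [a, b, w] 2 0 = w := rfl
      simp only [ha, hb, hw] at he ⊢
      by_cases hbrk : intensity < w
      · simp [hbrk] at he
      · simp only [hbrk, if_false] at he hrows
        simp only [Bool.and_eq_true, decide_eq_true_eq] at hrows
        obtain ⟨⟨⟨⟨h1, h2⟩, h3⟩, h4⟩, h5⟩ := hrows
        simp only [List.mem_cons] at he
        rcases he with rfl | rfl | he
        · exact ⟨h1, h2, h3, h4⟩
        · exact ⟨h3, h4, h1, h2⟩
        · exact ih h5 e he

-- ---- reachability: the common semantics of both searches ----

inductive pvReach (endL : List Bool) (E : List (Int × Int)) (gates : List Int) : Nat → Prop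
  | gate (g : Int) (k : Nat) (hg : g ∈ gates)
      (hk : PySem.List.pyIdx? endL.length g = some k) : pvReach endL E gates k
  | step (a b : Int) (ha : pvReach endL E gates a.toNat)
      (hen : endL.getD a.toNat false = false) (he : (a, b) ∈ E)
      (ha0 : 0 ≤ a) (hb0 : 0 ≤ b) : pvReach endL E gates b.toNat

-- ---- B: one pass ----

def pvStep (endL : List Bool) (st : List Bool × Bool) (e : Int × Int) : List Bool × Bool :=
  if PySem.List.pyGetD st.1 e.1 false && !PySem.List.pyGetD endL e.1 false
      && !PySem.List.pyGetD st.1 e.2 false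
  then (PySem.List.pySetD st.1 e.2 true, true) else st

theorem pvB_pass_eq (endL : List Bool) (E : List (Int × Int)) (v : List Bool) :
    pvB_pass endL E v = E.foldl (pvStep endL) (v, false) := rfl

theorem pvFold_length (endL : List Bool) (es : List (Int × Int)) :
    ∀ st : List Bool × Bool, (es.foldl (pvStep endL) st).1.length = st.1.length := by
  induction es with
  | nil => intro st; rfl
  | cons e t ih =>
    intro st
    simp only [List.foldl_cons]
    rw [ih]
    unfold pvStep
    split <;> simp [PySem.List.length_pySetD]

theorem pvFold_mono (endL : List Bool) (es : List (Int × Int)) :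
    ∀ st : List Bool × Bool, ∀ k, st.1.getD k false = true →
      (es.foldl (pvStep endL) st).1.getD k false = true := by
  induction es with
  | nil => intro st k h; exact h
  | cons e t ih =>
    intro st k h
    simp only [List.foldl_cons]
    refine ih _ k ?_
    unfold pvStep
    split
    · show (PySem.List.pySetD st.1 e.2 true).getD k false = true
      rw [pvMark_getD]
      split
      · rfl
      · exact h
    · exact h

theorem pvFold_flag (endL : List Bool) (es : List (Int × Int)) :
    ∀ st : List Bool × Bool, st.2 = true → (es.foldl (pvStep endL) st).2 = true := by
  induction es with
  | nil => intro st h; exact h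
  | cons e t ih =>
    intro st h
    simp only [List.foldl_cons]
    refine ih _ ?_
    unfold pvStep
    split <;> simp [h]

theorem pvFold_sound (endL : List Bool) (E0 : List (Int × Int)) (gates : List Int)
    (HE : ∀ e ∈ E0, 0 ≤ e.1 ∧ e.1 < (endL.length : Int) ∧ 0 ≤ e.2 ∧ e.2 < (endL.length : Int))
    (es : List (Int × Int)) (hsub : ∀ e ∈ es, e ∈ E0) :
    ∀ st : List Bool × Bool, st.1.length = endL.length →
      (∀ k, st.1.getD k false = true → pvReach endL E0 gates k) →
      ∀ k, (es.foldl (pvStep endL) st).1.getD k false = true → pvReach endL E0 gates k := by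
  induction es with
  | nil => intro st _ hs k h; exact hs k h
  | cons e t ih =>
    intro st hlen hs k h
    simp only [List.foldl_cons] at h
    have hesub : ∀ e' ∈ t, e' ∈ E0 := fun e' he' => hsub e' (List.mem_cons_of_mem _ he')
    have heE : e ∈ E0 := hsub e List.mem_cons_self
    obtain ⟨he10, he1L, he20, he2L⟩ := HE e heE
    refine ih hesub (pvStep endL st e) ?_ ?_ k h
    · unfold pvStep; split <;> simp [PySem.List.length_pySetD, hlen]
    · intro k' hk'
      unfold pvStep at hk'
      by_cases hc : (PySem.List.pyGetD st.1 e.1 false && !PySem.List.pyGetD endL e.1 false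
          && !PySem.List.pyGetD st.1 e.2 false) = true
      · rw [if_pos hc] at hk'
        simp only [Bool.and_eq_true, Bool.not_eq_eq_eq_not, Bool.not_true] at hc
        obtain ⟨⟨hva, hea⟩, hvb⟩ := hc
        rw [pvGetD_nonneg_toNat _ _ _ he10] at hva
        rw [pvGetD_nonneg_toNat _ _ _ he10] at hea
        have hra : pvReach endL E0 gates e.1.toNat := hs _ hva
        have hrb : pvReach endL E0 gates e.2.toNat :=
          pvReach.step e.1 e.2 hra hea (by simpa using heE) he10 he20
        have hk2 : (PySem.List.pySetD st.1 e.2 true).getD k' false = true := hk'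
        rw [pvMark_getD] at hk2
        by_cases hidx : PySem.List.pyIdx? st.1.length e.2 = some k'
        · rw [if_pos hidx] at hk2
          have := pvIdx_nonneg_eq _ _ _ he20 hidx
          subst this
          exact hrb
        · rw [if_neg hidx] at hk2
          exact hs k' hk2
      · rw [if_neg hc] at hk'
        exact hs k' hk'

theorem pvFold_unchanged (endL : List Bool) (es : List (Int × Int)) :
    ∀ v : List Bool, (es.foldl (pvStep endL) (v, false)).2 = false →
      (es.foldl (pvStep endL) (v, false)).1 = v ∧
      ∀ e ∈ es, PySem.List.pyGetD v e.1 false = true →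
        PySem.List.pyGetD endL e.1 false = false →
        PySem.List.pyGetD v e.2 false = true := by
  induction es with
  | nil => intro v _; exact ⟨rfl, by simp⟩
  | cons e t ih =>
    intro v hflag
    simp only [List.foldl_cons] at hflag ⊢
    by_cases hc : (PySem.List.pyGetD v e.1 false && !PySem.List.pyGetD endL e.1 false
        && !PySem.List.pyGetD v e.2 false) = true
    · exfalso
      have : (pvStep endL (v, false) e).2 = true := by unfold pvStep; rw [if_pos hc]
      have := pvFold_flag endL t _ this
      rw [this] at hflag
      exact absurd hflag (by decide)
    · have hstep : pvStep endL (v, false) e = (v, false) := by unfold pvStep; rw [if_neg hc]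
      rw [hstep] at hflag ⊢
      obtain ⟨h1, h2⟩ := ih v hflag
      refine ⟨h1, ?_⟩
      intro e' he' hva hea
      rcases List.mem_cons.mp he' with he' | he'
      · subst he'
        cases hb : PySem.List.pyGetD v e'.2 false with
        | true => rfl
        | false => exact absurd (by simp [hva, hea, hb]) hc
      · exact h2 e' he' hva hea

theorem pvFold_count (endL : List Bool) (es : List (Int × Int))
    (HE : ∀ e ∈ es, 0 ≤ e.2 ∧ e.2 < (endL.length : Int)) :
    ∀ st : List Bool × Bool, st.1.length = endL.length →
      pvCountFalse (es.foldl (pvStep endL) st).1 ≤ pvCountFalse st.1 ∧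
      (st.2 = false → (es.foldl (pvStep endL) st).2 = true →
        pvCountFalse (es.foldl (pvStep endL) st).1 < pvCountFalse st.1) := by
  induction es with
  | nil =>
    intro st _
    exact ⟨le_refl _, fun h1 h2 => absurd (h1 ▸ h2) (by simp)⟩
  | cons e t ih =>
    intro st hlen
    have hesub : ∀ e' ∈ t, 0 ≤ e'.2 ∧ e'.2 < (endL.length : Int) :=
      fun e' he' => HE e' (List.mem_cons_of_mem _ he')
    obtain ⟨he20, he2L⟩ := HE e List.mem_cons_self
    simp only [List.foldl_cons]
    by_cases hc : (PySem.List.pyGetD st.1 e.1 false && !PySem.List.pyGetD endL e.1 false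
        && !PySem.List.pyGetD st.1 e.2 false) = true
    · have hstep : pvStep endL st e = (PySem.List.pySetD st.1 e.2 true, true) := by
        unfold pvStep; rw [if_pos hc]
      have hlen' : (PySem.List.pySetD st.1 e.2 true).length = endL.length := by
        rw [PySem.List.length_pySetD]; exact hlen
      have hvb : PySem.List.pyGetD st.1 e.2 false = false := by
        simp only [Bool.and_eq_true, Bool.not_eq_eq_eq_not, Bool.not_true] at hc
        exact hc.2
      have hget : PySem.List.pyGet? st.1 e.2 = some false := by
        unfold PySem.List.pyGetD at hvb
        cases hg : PySem.List.pyGet? st.1 e.2 with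
        | none =>
          exfalso
          rw [PySem.List.pyGet?_eq_none_iff] at hg
          refine hg ?_
          unfold PySem.Raise.InRange
          omega
        | some b => rw [hg] at hvb; simp at hvb; rw [hvb]
      have hdec : pvCountFalse (PySem.List.pySetD st.1 e.2 true) < pvCountFalse st.1 :=
        pvCountFalse_set_lt _ _ hget
      obtain ⟨hle, _⟩ := ih hesub (PySem.List.pySetD st.1 e.2 true, true) hlen'
      rw [hstep]
      exact ⟨le_trans hle (le_of_lt hdec), fun _ _ => lt_of_le_of_lt hle hdec⟩
    · have hstep : pvStep endL st e = st := by unfold pvStep; rw [if_neg hc]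
      rw [hstep]
      exact ih hesub st hlen

theorem pvB_loop_char (endL : List Bool) (E0 : List (Int × Int)) (gates : List Int)
    (HE : ∀ e ∈ E0, 0 ≤ e.1 ∧ e.1 < (endL.length : Int) ∧ 0 ≤ e.2 ∧ e.2 < (endL.length : Int))
    (fuel : Nat) :
    ∀ v : List Bool, pvCountFalse v < fuel → v.length = endL.length →
      (∀ k, v.getD k false = true → pvReach endL E0 gates k) →
      (∀ g ∈ gates, ∀ k, PySem.List.pyIdx? endL.length g = some k → v.getD k false = true) →
      (pvB_loop endL E0 fuel v).length = endL.length ∧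
      (∀ k, (pvB_loop endL E0 fuel v).getD k false = true ↔ pvReach endL E0 gates k) := by
  induction fuel with
  | zero => intro v hf; omega
  | succ m ih =>
    intro v hf hlen hsound hbase
    unfold pvB_loop
    rw [pvB_pass_eq]
    by_cases hflag : (E0.foldl (pvStep endL) (v, false)).2 = true
    · simp only [hflag, if_true]
      obtain ⟨hle, hstrict⟩ := pvFold_count endL E0
        (fun e he => ⟨(HE e he).2.2.1, (HE e he).2.2.2⟩) (v, false) hlen
      have h2 : pvCountFalse (List.foldl (pvStep endL) (v, false) E0).1 < pvCountFalse v :=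
        hstrict rfl hflag
      refine ih _ (by omega) (by rw [pvFold_length]; exact hlen) ?_ ?_
      · exact pvFold_sound endL E0 gates HE E0 (fun e he => he) (v, false) hlen hsound
      · intro g hg k hk
        exact pvFold_mono endL E0 (v, false) k (hbase g hg k hk)
    · rw [Bool.not_eq_true] at hflag
      simp only [hflag]
      obtain ⟨hid, hclosed⟩ := pvFold_unchanged endL E0 v hflag
      rw [hid]
      refine ⟨hlen, fun k => ⟨hsound k, ?_⟩⟩
      intro hr
      induction hr with
      | gate g k hg hk => exact hbase g hg k hk
      | step a b ha hen he ha0 hb0 ihr =>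
        have hva : PySem.List.pyGetD v a false = true := by
          rw [pvGetD_nonneg_toNat _ _ _ ha0]; exact ihr
        have hea : PySem.List.pyGetD endL a false = false := by
          rw [pvGetD_nonneg_toNat _ _ _ ha0]; exact hen
        have := hclosed (a, b) he hva hea
        rw [pvGetD_nonneg_toNat _ _ _ hb0] at this
        exact this

-- ---- B: the initial gate-marking loop ----

theorem pvGates_mark (gates : List Int) :
    ∀ v : List Bool, ∀ k,
      ((gates.foldl (fun v g => PySem.List.pySetD v g true) v).getD k false = true ↔
        (v.getD k false = true ∨ ∃ g ∈ gates, PySem.List.pyIdx? v.length g = some k)) ∧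
      (gates.foldl (fun v g => PySem.List.pySetD v g true) v).length = v.length := by
  induction gates with
  | nil => intro v k; simp
  | cons g t ih =>
    intro v k
    simp only [List.foldl_cons]
    obtain ⟨hiff, hlen⟩ := ih (PySem.List.pySetD v g true) k
    rw [PySem.List.length_pySetD] at hlen hiff
    refine ⟨?_, hlen⟩
    rw [hiff, pvMark_getD]
    constructor
    · rintro (h | h)
      · split at h
        · right; exact ⟨g, List.mem_cons_self, by assumption⟩
        · left; exact h
      · obtain ⟨g', hg', hk'⟩ := h
        right; exact ⟨g', List.mem_cons_of_mem _ hg', hk'⟩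
    · rintro (h | ⟨g', hg', hk'⟩)
      · left
        split
        · rfl
        · simpa [List.getD_eq_getElem?_getD] using h
      · rcases List.mem_cons.mp hg' with hg' | hg'
        · subst hg'; left; rw [if_pos hk']
        · right; exact ⟨g', hg', hk'⟩

-- ---- A: the BFS loop ----

theorem pvGet?_idx {α : Type} (v : List α) (i : Int) (d : α) (x : α)
    (h : PySem.List.pyGet? v i = some x) :
    ∃ k, PySem.List.pyIdx? v.length i = some k ∧ v.getD k d = x := by
  unfold PySem.List.pyGet? at h
  cases hk : PySem.List.pyIdx? v.length i with
  | none => rw [hk] at h; simp at h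
  | some k =>
    rw [hk] at h
    simp only [Option.bind_some] at h
    exact ⟨k, rfl, by rw [List.getD_eq_getElem?_getD, h, Option.getD_some]⟩

theorem pvMark_mono (v : List Bool) (g : Int) (k : Nat) (h : v.getD k false = true) :
    (PySem.List.pySetD v g true).getD k false = true := by
  rw [pvMark_getD]
  split
  · rfl
  · exact h

theorem pvMark_self (v : List Bool) (g : Int) (k : Nat)
    (h : PySem.List.pyIdx? v.length g = some k) :
    (PySem.List.pySetD v g true).getD k false = true := by
  rw [pvMark_getD, if_pos h]

theorem pvA_bfs_char (conns : PySem.Dict Int (List Int)) (endL : List Bool)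
    (E0 : List (Int × Int)) (gates : List Int)
    (hcon : ∀ c j, j ∈ conns.getD c [] ↔ (c, j) ∈ E0)
    (HE : ∀ e ∈ E0, 0 ≤ e.1 ∧ e.1 < (endL.length : Int) ∧ 0 ≤ e.2 ∧ e.2 < (endL.length : Int)) :
    ∀ (queue : List Int) (visited : List Bool),
      visited.length = endL.length →
      (∀ q ∈ queue, PySem.Raise.InRange endL.length q) →
      (∀ q ∈ queue, ∀ k, PySem.List.pyIdx? endL.length q = some k → pvReach endL E0 gates k) →
      (∀ q ∈ queue, q < 0 → PySem.List.pyGetD endL q false = true) →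
      (∀ k, visited.getD k false = true → pvReach endL E0 gates k) →
      (∀ a : Int, 0 ≤ a → visited.getD a.toNat false = true → endL.getD a.toNat false = false →
        ∀ b, (a, b) ∈ E0 → visited.getD b.toNat false = true ∨
          ∃ q ∈ queue, PySem.List.pyIdx? endL.length q = some b.toNat) →
      (∀ g ∈ gates, ∀ k, PySem.List.pyIdx? endL.length g = some k →
        visited.getD k false = true ∨ ∃ q ∈ queue, PySem.List.pyIdx? endL.length q = some k) →
      (pvA_bfs conns endL queue visited).length = endL.length ∧
      (∀ k, (pvA_bfs conns endL queue visited).getD k false = true ↔ pvReach endL E0 gates k) := by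
  intro queue visited
  induction queue, visited using pvA_bfs.induct conns endL with
  | case1 visited =>
    intro hlen hQR hQreach hQN hS hC hG
    rw [pvA_bfs]
    refine ⟨hlen, fun k => ⟨hS k, ?_⟩⟩
    intro hr
    induction hr with
    | gate g k hg hk =>
      rcases hG g hg k hk with h | ⟨q, hq, _⟩
      · exact h
      · simp at hq
    | step a b ha hen he ha0 hb0 ihr =>
      rcases hC a ha0 ihr hen b he with h | ⟨q, hq, _⟩
      · exact h
      · simp at hq
  | case2 current rest visited h =>
    intro hlen hQR hQreach hQN hS hC hG
    exfalso
    rw [PySem.List.pyGet?_eq_none_iff] at h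
    apply h
    rw [hlen]
    exact hQR current List.mem_cons_self
  | case3 current rest visited h ih =>
    intro hlen hQR hQreach hQN hS hC hG
    rw [pvA_bfs, h]
    obtain ⟨k0, hk0, hv0⟩ := pvGet?_idx visited current false true h
    rw [hlen] at hk0
    refine ih hlen (fun q hq => hQR q (List.mem_cons_of_mem _ hq))
      (fun q hq => hQreach q (List.mem_cons_of_mem _ hq))
      (fun q hq => hQN q (List.mem_cons_of_mem _ hq)) hS ?_ ?_
    · intro a ha0 hma hena b he
      rcases hC a ha0 hma hena b he with hm | ⟨q, hq, hqk⟩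
      · exact Or.inl hm
      · rcases List.mem_cons.mp hq with rfl | hq
        · rw [hk0] at hqk
          obtain rfl : k0 = b.toNat := Option.some_inj.mp hqk
          exact Or.inl hv0
        · exact Or.inr ⟨q, hq, hqk⟩
    · intro g hg k hk
      rcases hG g hg k hk with hm | ⟨q, hq, hqk⟩
      · exact Or.inl hm
      · rcases List.mem_cons.mp hq with rfl | hq
        · rw [hk0] at hqk
          obtain rfl : k0 = k := Option.some_inj.mp hqk
          exact Or.inl hv0
        · exact Or.inr ⟨q, hq, hqk⟩
  | case4 current rest visited h vis' hendT ih =>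
    intro hlen hQR hQreach hQN hS hC hG
    rw [pvA_bfs, h]
    simp only [hendT, if_true]
    obtain ⟨k0, hk0, _⟩ := pvGet?_idx visited current false false h
    rw [hlen] at hk0
    have hk0' : PySem.List.pyIdx? visited.length current = some k0 := by rw [hlen]; exact hk0
    have hendk : endL.getD k0 false = true := by
      rw [← pvGetD_idx endL current k0 false hk0]
      exact hendT
    have hlen' : (PySem.List.pySetD visited current true).length = endL.length := by
      rw [PySem.List.length_pySetD]; exact hlen
    refine ih hlen'
      (fun q hq => hQR q (List.mem_cons_of_mem _ hq))
      (fun q hq => hQreach q (List.mem_cons_of_mem _ hq))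
      (fun q hq => hQN q (List.mem_cons_of_mem _ hq)) ?_ ?_ ?_
    · intro k hk
      have hk2 : (PySem.List.pySetD visited current true).getD k false = true := hk
      rw [pvMark_getD] at hk2
      by_cases hidx : PySem.List.pyIdx? visited.length current = some k
      · obtain rfl : k0 = k := Option.some_inj.mp (hk0' ▸ hidx)
        exact hQreach current List.mem_cons_self k0 hk0
      · rw [if_neg hidx] at hk2
        exact hS k hk2
    · intro a ha0 hma hena b he
      have hma0 : (PySem.List.pySetD visited current true).getD a.toNat false = true := hma
      have hma' : visited.getD a.toNat false = true := by
        rw [pvMark_getD] at hma0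
        by_cases hidx : PySem.List.pyIdx? visited.length current = some a.toNat
        · obtain rfl : k0 = a.toNat := Option.some_inj.mp (hk0' ▸ hidx)
          rw [hendk] at hena
          exact absurd hena (by decide)
        · rwa [if_neg hidx] at hma0
      rcases hC a ha0 hma' hena b he with hm | ⟨q, hq, hqk⟩
      · exact Or.inl (pvMark_mono _ _ _ hm)
      · rcases List.mem_cons.mp hq with rfl | hq
        · rw [hk0] at hqk
          obtain rfl : k0 = b.toNat := Option.some_inj.mp hqk
          exact Or.inl (pvMark_self _ _ _ hk0')
        · exact Or.inr ⟨q, hq, hqk⟩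
    · intro g hg k hk
      rcases hG g hg k hk with hm | ⟨q, hq, hqk⟩
      · exact Or.inl (pvMark_mono _ _ _ hm)
      · rcases List.mem_cons.mp hq with rfl | hq
        · rw [hk0] at hqk
          obtain rfl : k0 = k := Option.some_inj.mp hqk
          exact Or.inl (pvMark_self _ _ _ hk0')
        · exact Or.inr ⟨q, hq, hqk⟩
  | case5 current rest visited h vis' hendT ih =>
    intro hlen hQR hQreach hQN hS hC hG
    rw [pvA_bfs, h]
    simp only [hendT]
    have hcur0 : 0 ≤ current := by
      by_contra hneg
      have := hQN current List.mem_cons_self (by omega)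
      rw [this] at hendT
      exact hendT rfl
    have hendF : PySem.List.pyGetD endL current false = false := by
      cases hb : PySem.List.pyGetD endL current false
      · rfl
      · exact absurd hb hendT
    obtain ⟨k0, hk0, _⟩ := pvGet?_idx visited current false false h
    rw [hlen] at hk0
    have hk0' : PySem.List.pyIdx? visited.length current = some k0 := by rw [hlen]; exact hk0
    obtain rfl : k0 = current.toNat := pvIdx_nonneg_eq _ _ _ hcur0 hk0
    have hcurL : current < (endL.length : Int) := by
      have := hQR current List.mem_cons_self
      unfold PySem.Raise.InRange at this
      omega
    have hendk : endL.getD current.toNat false = false := by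
      rw [← pvGetD_idx endL current current.toNat false hk0]
      exact hendF
    have hreachCur : pvReach endL E0 gates current.toNat :=
      hQreach current List.mem_cons_self current.toNat hk0
    have hnbr : ∀ j ∈ conns.getD current [], (current, j) ∈ E0 :=
      fun j hj => (hcon current j).mp hj
    have hlen' : (PySem.List.pySetD visited current true).length = endL.length := by
      rw [PySem.List.length_pySetD]; exact hlen
    refine ih hlen' ?_ ?_ ?_ ?_ ?_ ?_
    · intro q hq
      rcases List.mem_append.mp hq with hq | hq
      · exact hQR q (List.mem_cons_of_mem _ hq)
      · obtain ⟨_, _, hj0, hjL⟩ := HE _ (hnbr q hq)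
        unfold PySem.Raise.InRange
        omega
    · intro q hq k hk
      rcases List.mem_append.mp hq with hq | hq
      · exact hQreach q (List.mem_cons_of_mem _ hq) k hk
      · obtain ⟨_, _, hj0, hjL⟩ := HE _ (hnbr q hq)
        obtain rfl : k = q.toNat := pvIdx_nonneg_eq _ _ _ hj0 hk
        exact pvReach.step current q hreachCur hendk (hnbr q hq) hcur0 hj0
    · intro q hq hqneg
      rcases List.mem_append.mp hq with hq | hq
      · exact hQN q (List.mem_cons_of_mem _ hq) hqneg
      · obtain ⟨_, _, hj0, _⟩ := HE _ (hnbr q hq)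
        omega
    · intro k hk
      have hk2 : (PySem.List.pySetD visited current true).getD k false = true := hk
      rw [pvMark_getD] at hk2
      by_cases hidx : PySem.List.pyIdx? visited.length current = some k
      · obtain rfl : current.toNat = k := Option.some_inj.mp (hk0' ▸ hidx)
        exact hreachCur
      · rw [if_neg hidx] at hk2
        exact hS k hk2
    · intro a ha0 hma hena b he
      have hma0 : (PySem.List.pySetD visited current true).getD a.toNat false = true := hma
      rw [pvMark_getD] at hma0
      by_cases hidx : PySem.List.pyIdx? visited.length current = some a.toNat
      · have heq : current.toNat = a.toNat := Option.some_inj.mp (hk0' ▸ hidx)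
        have heq2 : a = current := by omega
        refine Or.inr ⟨b, List.mem_append_right _ ((hcon current b).mpr (heq2 ▸ he)), ?_⟩
        obtain ⟨_, _, hb0, hbL⟩ := HE _ he
        exact pvIdx_nonneg _ _ hb0 hbL
      · rw [if_neg hidx] at hma0
        rcases hC a ha0 hma0 hena b he with hm | ⟨q, hq, hqk⟩
        · exact Or.inl (pvMark_mono _ _ _ hm)
        · rcases List.mem_cons.mp hq with heqq | hq
          · rw [heqq, hk0] at hqk
            have hbk : current.toNat = b.toNat := Option.some_inj.mp hqk
            exact Or.inl (hbk ▸ pvMark_self _ _ _ hk0')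
          · exact Or.inr ⟨q, List.mem_append_left _ hq, hqk⟩
    · intro g hg k hk
      rcases hG g hg k hk with hm | ⟨q, hq, hqk⟩
      · exact Or.inl (pvMark_mono _ _ _ hm)
      · rcases List.mem_cons.mp hq with heqq | hq
        · rw [heqq, hk0] at hqk
          have hbk : current.toNat = k := Option.some_inj.mp hqk
          exact Or.inl (hbk ▸ pvMark_self _ _ _ hk0')
        · exact Or.inr ⟨q, List.mem_append_left _ hq, hqk⟩

-- ---- the final scan: first hit of the sorted list vs min of the filtered list ----

theorem pvA_scan_filter (v : List Bool) : ∀ l : List Int,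
    pvA_scan v l = (match l.filter (fun s => PySem.List.pyGetD v s false) with
      | [] => 0
      | x :: _ => x) := by
  intro l
  induction l with
  | nil => rfl
  | cons s t ih =>
    unfold pvA_scan
    cases hg : PySem.List.pyGet? v s with
    | none =>
      have hp : PySem.List.pyGetD v s false = false := by
        unfold PySem.List.pyGetD; rw [hg]; rfl
      simp only [List.filter_cons, hp]
      exact ih
    | some b =>
      have hp : PySem.List.pyGetD v s false = b := by
        unfold PySem.List.pyGetD; rw [hg]; rfl
      cases b with
      | true => simp [hp]
      | false =>
        simp only [List.filter_cons, hp]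
        exact ih

theorem pvScan_min (v : List Bool) (summits : List Int) :
    pvA_scan v (PySem.List.sorted summits (fun x => x) false) = pvB_result v summits := by
  rw [pvA_scan_filter]
  unfold pvB_result
  set p := fun s => PySem.List.pyGetD v s false with hp
  have hperm : ((PySem.List.sorted summits (fun x => x) false).filter p).Perm (summits.filter p) :=
    (PySem.List.sorted_perm summits (fun x => x) false).filter p
  cases hf : (PySem.List.sorted summits (fun x => x) false).filter p with
  | nil =>
    rw [hf] at hperm
    have hnil : summits.filter p = [] := hperm.symm.eq_nil
    rw [hnil]
    rfl
  | cons h t =>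
    rw [hf] at hperm
    have hne : summits.filter p ≠ [] := by
      intro h0
      rw [h0] at hperm
      exact List.cons_ne_nil h t hperm.eq_nil
    cases hm : PySem.List.min? (summits.filter p) (fun x => x) with
    | none => exact absurd ((PySem.List.min?_eq_none_iff _ _).mp hm) hne
    | some m =>
      simp only [hm]
      have hmin := PySem.List.min?_isMin hm
      have hmemS : m ∈ h :: t := hperm.mem_iff.mpr (PySem.List.min?_mem hm)
      have hhS : h ∈ summits.filter p := hperm.subset List.mem_cons_self
      have h1 : m ≤ h := hmin h hhS
      have hpw : (h :: t).Pairwise (fun a b : Int => a ≤ b) := by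
        rw [← hf]
        exact (PySem.List.sorted_pairwise summits (fun x => x)).filter p
      have h2 : h ≤ m := by
        rcases List.mem_cons.mp hmemS with heq | hm2
        · omega
        · exact (List.pairwise_cons.mp hpw).1 m hm2
      omega

-- ---- final assembly ----

theorem pvReplicate_getD (m k : Nat) : (List.replicate m false).getD k false = false := by
  rw [List.getD_eq_getElem?_getD, List.getElem?_replicate]
  split <;> rfl

theorem get_min_summit_eq_alt (n : Int) (paths : List (List Int)) (intensity : Int)
    (gates : List Int) (summits : List Int)
    (hpre : Pre_get_min_summit n paths intensity gates summits) :
    get_min_summit n paths intensity gates summits =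
      get_min_summit_alt n paths intensity gates summits := by
  obtain ⟨hrows, hgates, hsummits, -⟩ := hpre
  simp only [get_min_summit, get_min_summit_alt]
  set endL := (PySem.List.pyRange 0 (n + 1) 1).map (fun i => summits.contains i) with hendL
  set E0 := pvB_edges intensity paths with hE0
  have hEndLen : endL.length = (n + 1).toNat := pvRange_map_length _ _
  have hEndGetD : ∀ k : Nat, endL.getD k false =
      if k < (n + 1).toNat then summits.contains (k : Int) else false :=
    fun k => pvRange_map_getD (n + 1) _ k false
  have hbounds := pvEdges_bound n intensity paths hrows
  have HE : ∀ e ∈ E0, 0 ≤ e.1 ∧ e.1 < (endL.length : Int) ∧ 0 ≤ e.2 ∧ e.2 < (endL.length : Int) := by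
    intro e he
    obtain ⟨h1, h2, h3, h4⟩ := hbounds e he
    rw [hEndLen]
    omega
  have hcon : ∀ c j, j ∈ (pvA_connections n paths intensity).getD c [] ↔ (c, j) ∈ E0 :=
    fun c j => pvConn_mem n paths intensity c j
  have HgR : ∀ g ∈ gates, PySem.Raise.InRange endL.length g := by
    intro g hg
    unfold PySem.Raise.InRange
    rw [hEndLen]
    rcases hgates g hg with ⟨h1, h2⟩ | ⟨h1, h2, _⟩ <;> omega
  have HgN : ∀ g ∈ gates, g < 0 → PySem.List.pyGetD endL g false = true := by
    intro g hg hneg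
    rcases hgates g hg with ⟨h1, _⟩ | ⟨h1, h2, hmem⟩
    · omega
    · have hn0 : 0 ≤ n := by omega
      have hidxg : PySem.List.pyIdx? endL.length g = some (endL.length - (-g).toNat) := by
        unfold PySem.List.pyIdx?
        rw [if_neg (by omega), if_pos (by rw [hEndLen]; omega)]
      rw [pvGetD_idx endL g _ false hidxg, hEndGetD, if_pos (by omega)]
      have hcast : ((endL.length - (-g).toNat : Nat) : Int) = n + 1 + g := by
        rw [hEndLen]; omega
      rw [hcast]
      rw [if_neg (by omega)] at hmem
      exact List.elem_eq_true_of_mem hmem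
  have hQreach0 : ∀ q ∈ gates, ∀ k, PySem.List.pyIdx? endL.length q = some k →
      pvReach endL E0 gates k := fun q hq k hk => pvReach.gate q k hq hk
  -- the two initial visited lists are the same all-False list
  have hInitA : ((PySem.List.pyRange 0 (n + 1) 1).map (fun _ => false)) =
      List.replicate (n + 1).toNat false := pvInit_eq (n + 1)
  have hInitB : PySem.List.pyRepeat [false] (n + 1) = List.replicate (n + 1).toNat false :=
    PySem.List.pyRepeat_singleton false (n + 1)
  -- A: the BFS characterization
  have hcharA := pvA_bfs_char (pvA_connections n paths intensity) endL E0 gates hcon HE gates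
      ((PySem.List.pyRange 0 (n + 1) 1).map (fun _ => false))
      (by rw [hInitA, List.length_replicate, hEndLen])
      HgR hQreach0 HgN
      (by intro k hk; rw [hInitA, pvReplicate_getD] at hk; exact absurd hk (by decide))
      (by intro a _ hma; rw [hInitA, pvReplicate_getD] at hma; exact absurd hma (by decide))
      (by intro g hg k hk; exact Or.inr ⟨g, hg, hk⟩)
  -- B: the gate-marking init and the saturation characterization
  set v1 := gates.foldl (fun v g => PySem.List.pySetD v g true) (PySem.List.pyRepeat [false] (n + 1)) with hv1
  have hmark := pvGates_mark gates (PySem.List.pyRepeat [false] (n + 1))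
  have hv1len : v1.length = endL.length := by
    rw [hv1, (hmark 0).2, hInitB, List.length_replicate, hEndLen]
  have hv0len : (PySem.List.pyRepeat [false] (n + 1)).length = endL.length := by
    rw [hInitB, List.length_replicate, hEndLen]
  have hv1iff : ∀ k, v1.getD k false = true ↔
      ∃ g ∈ gates, PySem.List.pyIdx? endL.length g = some k := by
    intro k
    rw [hv1, (hmark k).1, hInitB]
    rw [← hInitB, hv0len]
    simp [hInitB]
  have hcharB := pvB_loop_char endL E0 gates HE (v1.length + 1) v1
      (by have := pvCountFalse_le_length v1; omega)
      hv1len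
      (by intro k hk
          obtain ⟨g, hg, hk'⟩ := (hv1iff k).mp hk
          exact pvReach.gate g k hg hk')
      (by intro g hg k hk; exact (hv1iff k).mpr ⟨g, hg, hk⟩)
  -- the two final visited lists are equal
  have hlistEq : pvA_bfs (pvA_connections n paths intensity) endL gates
        ((PySem.List.pyRange 0 (n + 1) 1).map (fun _ => false)) =
      pvB_loop endL E0 (v1.length + 1) v1 := by
    apply List.ext_getElem (by rw [hcharA.1, hcharB.1])
    intro k h1 h2
    have hk : (pvA_bfs (pvA_connections n paths intensity) endL gates
          ((PySem.List.pyRange 0 (n + 1) 1).map (fun _ => false))).getD k false =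
        (pvB_loop endL E0 (v1.length + 1) v1).getD k false := by
      by_cases hA : (pvA_bfs (pvA_connections n paths intensity) endL gates
          ((PySem.List.pyRange 0 (n + 1) 1).map (fun _ => false))).getD k false = true
      · rw [hA, ((hcharB.2 k).mpr ((hcharA.2 k).mp hA))]
      · rw [Bool.not_eq_true] at hA
        rw [hA]
        by_cases hB : (pvB_loop endL E0 (v1.length + 1) v1).getD k false = true
        · rw [(hcharA.2 k).mpr ((hcharB.2 k).mp hB)] at hA
          exact absurd hA (by decide)
        · rw [Bool.not_eq_true] at hB
          rw [hB]
    rw [List.getD_eq_getElem?_getD, List.getD_eq_getElem?_getD,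
      List.getElem?_eq_getElem h1, List.getElem?_eq_getElem h2] at hk
    simpa using hk
  rw [hlistEq]
  exact pvScan_min _ _

-- ===== VERDICT (by name: the statement is the Claim_ definition above) =====
theorem get_min_summit_spec : Claim_equal_get_min_summit := by
  intro n paths intensity gates summits _ hpre
  unfold Spec_get_min_summit
  exact get_min_summit_eq_alt n paths intensity gates summits hpre
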